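-- pv_equiv track=rewrite | github.com/Ajay2812/DSA | data structures/Maze/1st.py | listpathdia
-- ===== SOURCE A (Python) =====
-- def listpathdia(p,r,c):
--
--     if r==1 and c==1:
--         l=[]
--         l.append(p)
--         return l
--     li=[]
--     if r>1:
--         li.extend(listpathdia(p+'V',r-1,c))
--     if c>1:
--         li.extend(listpathdia(p+'H',r,c-1))
--     if r>1 and c>1:
--         li.extend(listpathdia(p+'D',r-1,c-1))
--     return li
-- ===== SOURCE B (Python) =====
-- def listpathdia(p, r, c):
--     res = []
--     stack = [(p, r, c)]
--     while stack:
--         p0, r0, c0 = stack.pop()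
--         if r0 == 1 and c0 == 1:
--             res.append(p0)
--             continue
--         if r0 > 1 and c0 > 1:
--             stack.append((p0 + 'D', r0 - 1, c0 - 1))
--         if c0 > 1:
--             stack.append((p0 + 'H', r0, c0 - 1))
--         if r0 > 1:
--             stack.append((p0 + 'V', r0 - 1, c0))
--     return res
-- ===== Notes on version B (the rewrite author's own statement) =====
-- stated objective: alternative
-- what changed: Replaces A's threefold recursion with an iterative DFS over an explicit stack of (path, r, c) states, pushing children in reverse (D, H, V) so the V-H-D path order is preserved.
import Mathlib
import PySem

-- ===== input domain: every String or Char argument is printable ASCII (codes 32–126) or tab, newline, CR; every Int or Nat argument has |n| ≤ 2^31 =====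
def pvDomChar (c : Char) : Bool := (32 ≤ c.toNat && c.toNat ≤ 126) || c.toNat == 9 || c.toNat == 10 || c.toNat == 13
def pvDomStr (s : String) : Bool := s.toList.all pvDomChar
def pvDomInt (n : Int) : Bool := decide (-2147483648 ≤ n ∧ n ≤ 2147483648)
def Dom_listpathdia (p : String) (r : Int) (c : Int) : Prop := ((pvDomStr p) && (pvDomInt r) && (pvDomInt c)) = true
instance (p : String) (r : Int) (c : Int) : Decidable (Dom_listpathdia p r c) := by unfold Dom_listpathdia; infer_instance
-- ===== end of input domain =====

-- B replaces A's threefold recursion by an iterative DFS over an explicit stack of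
-- (path, r, c) states (children pushed in reverse so the V-H-D order is preserved);
-- objective: alternative decomposition, same asymptotic cost.

-- ===== PORT A =====
-- A's recursion, with a fuel parameter making it structural; r.toNat + c.toNat
-- strictly decreases at every recursive call, so fuel r.toNat + c.toNat + 1 in
-- `listpathdia` below is never exhausted (lemma pvFuel_eq) and the 0-fuel arm is
-- unreachable.
def listpathdiaFuel : Nat → String → Int → Int → List String
  | 0, _, _, _ => []
  | fuel + 1, p, r, c =>
    if r = 1 ∧ c = 1 then
      [p]
    else
      let li : List String := []
      let li1 := if r > 1 then li ++ listpathdiaFuel fuel (p ++ "V") (r - 1) c else li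
      let li2 := if c > 1 then li1 ++ listpathdiaFuel fuel (p ++ "H") r (c - 1) else li1
      let li3 := if r > 1 ∧ c > 1 then li2 ++ listpathdiaFuel fuel (p ++ "D") (r - 1) (c - 1) else li2
      li3

def listpathdia (p : String) (r : Int) (c : Int) : List String :=
  listpathdiaFuel (r.toNat + c.toNat + 1) p r c

-- ===== PORT B =====
-- the while-loop of Source B: pop the head (top of stack); on a goal cell record the
-- path, otherwise push the eligible children D, H, V (so V ends on top); fueled
-- by the measure above (lemma pvLoop_eq shows the 0-fuel arm is unreachable)
def listpathdiaLoop : Nat → List (String × Int × Int) → List String → List String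
  | _, [], res => res
  | 0, _ :: _, res => res
  | fuel + 1, (p0, r0, c0) :: st, res =>
    if r0 = 1 ∧ c0 = 1 then
      listpathdiaLoop fuel st (res ++ [p0])
    else
      listpathdiaLoop fuel
        ((if r0 > 1 then [(p0 ++ "V", r0 - 1, c0)] else []) ++
         (if c0 > 1 then [(p0 ++ "H", r0, c0 - 1)] else []) ++
         (if r0 > 1 ∧ c0 > 1 then [(p0 ++ "D", r0 - 1, c0 - 1)] else []) ++ st) res

def listpathdia_alt (p : String) (r : Int) (c : Int) : List String :=
  listpathdiaLoop (4 ^ (r.toNat + c.toNat)) [(p, r, c)] []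

-- ===== PRECONDITION & SPEC =====
-- Pre_ excludes exactly the inputs on which Python A raises RecursionError: A's
-- deepest recursion chain has (r-1)+(c-1) nested calls, and under the runner's
-- recursion limit of 10000 A returns up to depth 9997 and raises from 9998 on
-- (measured); nothing else is excluded.
def Pre_listpathdia (p : String) (r : Int) (c : Int) : Prop :=
  (r - 1).toNat + (c - 1).toNat ≤ 9997
instance (p : String) (r : Int) (c : Int) : Decidable (Pre_listpathdia p r c) := by unfold Pre_listpathdia; infer_instance
def pvWitness_listpathdia : String × Int × Int := ("", 3, 3)

def Spec_listpathdia (p : String) (r : Int) (c : Int) (out : List String) : Prop := out = listpathdia_alt p r c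
instance (p : String) (r : Int) (c : Int) (out : List String) : Decidable (Spec_listpathdia p r c out) := by unfold Spec_listpathdia; infer_instance

-- ===== CLAIM (what is proved, stated in full; the proofs are below) =====
def Claim_equal_listpathdia : Prop := ∀ (p : String) (r : Int) (c : Int), Dom_listpathdia p r c → Pre_listpathdia p r c → Spec_listpathdia p r c (listpathdia p r c)

-- ===== LEMMAS AND PROOFS =====

-- stack measure: sum of 4^(r.toNat + c.toNat) over the stack; every loop
-- iteration strictly decreases it, so it bounds the number of iterations
def pvMeas : List (String × Int × Int) → Nat
  | [] => 0
  | (_, r, c) :: t => 4 ^ (r.toNat + c.toNat) + pvMeas t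

-- the fuel value does not matter as long as it exceeds r.toNat + c.toNat
theorem pvFuelCongr : ∀ (f g : Nat) (p : String) (r c : Int),
    r.toNat + c.toNat < f → r.toNat + c.toNat < g →
    listpathdiaFuel f p r c = listpathdiaFuel g p r c := by
  intro f
  induction f with
  | zero => intro g p r c hf _; omega
  | succ f ih =>
    intro g p r c hf hg
    cases g with
    | zero => omega
    | succ g =>
      simp only [listpathdiaFuel]
      by_cases hb : r = 1 ∧ c = 1
      · simp [hb]
      · simp only [if_neg hb]
        by_cases h1 : r > 1 <;> by_cases h2 : c > 1 <;>
          simp only [h1, h2, and_self, and_true, and_false, ite_true, ite_false,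
            List.nil_append]
        · rw [ih g (p ++ "V") (r - 1) c (by omega) (by omega),
            ih g (p ++ "H") r (c - 1) (by omega) (by omega),
            ih g (p ++ "D") (r - 1) (c - 1) (by omega) (by omega)]
        · rw [ih g (p ++ "V") (r - 1) c (by omega) (by omega)]
        · rw [ih g (p ++ "H") r (c - 1) (by omega) (by omega)]

theorem pvFuel_eq (f : Nat) (p : String) (r c : Int) (h : r.toNat + c.toNat < f) :
    listpathdiaFuel f p r c = listpathdia p r c :=
  pvFuelCongr f (r.toNat + c.toNat + 1) p r c h (by omega)

theorem pvA_base (p : String) : listpathdia p 1 1 = [p] := by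
  simp [listpathdia, listpathdiaFuel]

-- A's recursion unfolded one step, written over `listpathdia` itself
theorem pvA_step (p : String) (r c : Int) (h : ¬(r = 1 ∧ c = 1)) :
    listpathdia p r c =
      (if r > 1 then listpathdia (p ++ "V") (r - 1) c else []) ++
      (if c > 1 then listpathdia (p ++ "H") r (c - 1) else []) ++
      (if r > 1 ∧ c > 1 then listpathdia (p ++ "D") (r - 1) (c - 1) else []) := by
  conv_lhs => rw [listpathdia]
  simp only [listpathdiaFuel, if_neg h]
  by_cases h1 : r > 1 <;> by_cases h2 : c > 1 <;>
    simp only [h1, h2, and_self, and_true, and_false, ite_true, ite_false,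
      List.nil_append, List.append_nil]
  · rw [pvFuel_eq _ _ _ _ (by omega), pvFuel_eq _ _ _ _ (by omega),
      pvFuel_eq _ _ _ _ (by omega)]
  · rw [pvFuel_eq _ _ _ _ (by omega)]
  · rw [pvFuel_eq _ _ _ _ (by omega)]

-- one loop step strictly shrinks the measure of the pushed stack
theorem pvMeasStep (p0 : String) (r0 c0 : Int) (st : List (String × Int × Int)) :
    pvMeas ((if r0 > 1 then [(p0 ++ "V", r0 - 1, c0)] else []) ++
            (if c0 > 1 then [(p0 ++ "H", r0, c0 - 1)] else []) ++
            (if r0 > 1 ∧ c0 > 1 then [(p0 ++ "D", r0 - 1, c0 - 1)] else []) ++ st)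
      < 4 ^ (r0.toNat + c0.toNat) + pvMeas st := by
  have hpos : ∀ m : Nat, 0 < (4:Nat) ^ m := fun _ => Nat.pow_pos (by norm_num)
  have hle : ∀ a b : Nat, a ≤ b → (4:Nat) ^ a ≤ 4 ^ b :=
    fun a b h => Nat.pow_le_pow_right (by norm_num) h
  split_ifs with h1 h2 h3 <;>
    simp only [List.nil_append, List.cons_append, pvMeas] <;>
    first
      | exact absurd ⟨h1, h2⟩ h3
      | exact absurd h3.1 h1
      | exact absurd h3.2 h2
      | (have hp0 := hpos (r0.toNat + c0.toNat); omega)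
      | (have hp : (4:Nat) ^ (r0.toNat + c0.toNat - 1) * 4 = 4 ^ (r0.toNat + c0.toNat) := by
           rw [← pow_succ]; congr 1; omega
         have hp1 := hpos (r0.toNat + c0.toNat - 1)
         have b1 : (4:Nat) ^ ((r0 - 1).toNat + c0.toNat) ≤ 4 ^ (r0.toNat + c0.toNat - 1) :=
           hle _ _ (by omega)
         omega)
      | (have hp : (4:Nat) ^ (r0.toNat + c0.toNat - 1) * 4 = 4 ^ (r0.toNat + c0.toNat) := by
           rw [← pow_succ]; congr 1; omega
         have hp1 := hpos (r0.toNat + c0.toNat - 1)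
         have b2 : (4:Nat) ^ (r0.toNat + (c0 - 1).toNat) ≤ 4 ^ (r0.toNat + c0.toNat - 1) :=
           hle _ _ (by omega)
         omega)
      | (have hp : (4:Nat) ^ (r0.toNat + c0.toNat - 1) * 4 = 4 ^ (r0.toNat + c0.toNat) := by
           rw [← pow_succ]; congr 1; omega
         have hp1 := hpos (r0.toNat + c0.toNat - 1)
         have b1 : (4:Nat) ^ ((r0 - 1).toNat + c0.toNat) ≤ 4 ^ (r0.toNat + c0.toNat - 1) :=
           hle _ _ (by omega)
         have b2 : (4:Nat) ^ (r0.toNat + (c0 - 1).toNat) ≤ 4 ^ (r0.toNat + c0.toNat - 1) :=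
           hle _ _ (by omega)
         have b3 : (4:Nat) ^ ((r0 - 1).toNat + (c0 - 1).toNat) ≤ 4 ^ (r0.toNat + c0.toNat - 1) :=
           hle _ _ (by omega)
         omega)

-- given enough fuel, the loop returns the accumulator followed by A's answers
-- for each stacked state in order
theorem pvLoop_eq : ∀ (f : Nat) (st : List (String × Int × Int)) (res : List String),
    pvMeas st ≤ f →
    listpathdiaLoop f st res =
      res ++ (st.map (fun t => listpathdia t.1 t.2.1 t.2.2)).flatten := by
  intro f
  induction f with
  | zero =>
    intro st res h
    cases st with
    | nil => simp [listpathdiaLoop]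
    | cons a t =>
      obtain ⟨p0, r0, c0⟩ := a
      have := Nat.pow_pos (show (0:Nat) < 4 by norm_num) (n := r0.toNat + c0.toNat)
      simp only [pvMeas] at h
      omega
  | succ f ih =>
    intro st res h
    cases st with
    | nil => simp [listpathdiaLoop]
    | cons a t =>
      obtain ⟨p0, r0, c0⟩ := a
      have hpos := Nat.pow_pos (show (0:Nat) < 4 by norm_num) (n := r0.toNat + c0.toNat)
      simp only [pvMeas] at h
      simp only [listpathdiaLoop]
      by_cases hb : r0 = 1 ∧ c0 = 1
      · simp only [if_pos hb]
        rw [ih t (res ++ [p0]) (by omega)]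
        obtain ⟨h1, h2⟩ := hb
        subst h1; subst h2
        simp [pvA_base]
      · simp only [if_neg hb]
        have hm := pvMeasStep p0 r0 c0 t
        rw [ih _ res (by omega)]
        rw [List.map_cons, List.flatten_cons, pvA_step p0 r0 c0 hb]
        by_cases h1 : r0 > 1 <;> by_cases h2 : c0 > 1 <;>
          simp [h1, h2]

-- ===== VERDICT (by name: the statement is the Claim_ definition above) =====
theorem listpathdia_spec : Claim_equal_listpathdia := by
  intro p r c _ _
  unfold Spec_listpathdia listpathdia_alt
  rw [pvLoop_eq (4 ^ (r.toNat + c.toNat)) [(p, r, c)] []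
      (by simp [pvMeas])]
  simp
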